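-- pv_equiv track=rewrite | github.com/zaghloul404/englishidioms | C_readit.py | split_by_value
-- ===== SOURCE A (Python) =====
-- def split_by_value(alt, runs, value):
--     """
--     Splits the provided `alt` and `runs` lists into smaller sublists based on a given `value`.
--
--     Args:
--         alt (List[str]): A list of phrase alternatives.
--         runs (List[str]): A list of runs associated with the alternatives.
--         value (str): The value used as a separator to split the lists.
--
--     Returns:
--         Tuple[List[List[str]], List[List[str]]]: A tuple containing two lists:
--             1. `alt_result`: Sublists of alternative phrases separated by the `value`.
--             2. `runs_result`: Sublists of runs associated with the separated alternative phrases.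
--
--     Example:
--         Input:
--             alt = ["constant", "value", "constant", "constant", "value", "constant"]
--             runs = ["run1", "run2", "run3", "run4", "run5", "run6"]
--             value = "value"
--
--         Output:
--             alt_result = [['constant'], ['constant', 'constant'], ['constant']]
--             runs_result = [['run1'], ['run3', 'run4'], ['run6']]
--     """
--
--     alt_result = []
--     runs_result = []
--     temp_alt = []
--     temp_runs = []
--
--     for a, r in zip(alt, runs):
--         if a.strip() == value:
--             alt_result.append(temp_alt)
--             runs_result.append(temp_runs)
--             temp_alt = []
--             temp_runs = []
--         else:
--             temp_alt.append(a)
--             temp_runs.append(r)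
--
--     # Append the last sublists
--     alt_result.append(temp_alt)
--     runs_result.append(temp_runs)
--
--     return alt_result, runs_result
-- ===== SOURCE B (Python) =====
-- def split_by_value(alt, runs, value):
--     pairs = list(zip(alt, runs))
--     seps = [i for i, (a, _) in enumerate(pairs) if a.strip() == value]
--     bounds = zip([-1] + seps, seps + [len(pairs)])
--     parts = [pairs[lo + 1:hi] for lo, hi in bounds]
--     return [[a for a, _ in p] for p in parts], [[r for _, r in p] for p in parts]
-- ===== Notes on version B (the rewrite author's own statement) =====
-- stated objective: alternative
-- what changed: Replaces A's single left scan carrying four accumulators (growing temp lists flushed at each separator) by an index-collection pass that records separator positions in the zipped list and then slices the list between consecutive boundaries.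
import Mathlib
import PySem

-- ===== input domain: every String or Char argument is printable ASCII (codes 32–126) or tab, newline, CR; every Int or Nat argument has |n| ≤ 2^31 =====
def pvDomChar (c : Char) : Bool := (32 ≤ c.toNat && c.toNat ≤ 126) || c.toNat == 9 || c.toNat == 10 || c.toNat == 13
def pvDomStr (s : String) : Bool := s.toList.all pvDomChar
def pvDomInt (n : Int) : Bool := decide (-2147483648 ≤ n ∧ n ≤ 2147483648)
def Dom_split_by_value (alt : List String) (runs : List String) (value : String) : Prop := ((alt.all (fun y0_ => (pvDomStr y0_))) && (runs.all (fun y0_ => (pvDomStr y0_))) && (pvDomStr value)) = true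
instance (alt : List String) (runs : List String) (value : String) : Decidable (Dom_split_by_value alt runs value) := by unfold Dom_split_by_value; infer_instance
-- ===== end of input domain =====

-- B replaces A's accumulator-carrying scan by collecting separator indices and slicing
-- between consecutive boundaries (objective: alternative; same cost).

-- shared helper: the Python test `a.strip() == value`
def pvSep (value : String) (a : String) : Bool := PySem.Str.strip a == value

-- ===== PORT A =====
-- loop body of A's `for a, r in zip(alt, runs)` (state = (alt_result, runs_result, temp_alt, temp_runs))
def pvStepA (value : String)
    (st : List (List String) × List (List String) × List String × List String)
    (p : String × String) :
    List (List String) × List (List String) × List String × List String :=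
  if pvSep value p.1 then
    (st.1 ++ [st.2.2.1], st.2.1 ++ [st.2.2.2], [], [])
  else
    (st.1, st.2.1, st.2.2.1 ++ [p.1], st.2.2.2 ++ [p.2])

def split_by_value (alt : List String) (runs : List String) (value : String) : List (List String) × List (List String) :=
  let fin := (alt.zip runs).foldl (pvStepA value) ([], [], [], [])
  (fin.1 ++ [fin.2.2.1], fin.2.1 ++ [fin.2.2.2])

-- ===== PORT B =====
def split_by_value_alt (alt : List String) (runs : List String) (value : String) : List (List String) × List (List String) :=
  let pairs := alt.zip runs
  let seps : List Int := ((PySem.List.enumerate pairs 0).filter (fun q => pvSep value q.2.1)).map (·.1)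
  let bounds := ((-1 : Int) :: seps).zip (seps ++ [(pairs.length : Int)])
  let parts := bounds.map (fun b => PySem.List.slice pairs (some (b.1 + 1)) (some b.2))
  (parts.map (fun p => p.map (·.1)), parts.map (fun p => p.map (·.2)))

-- ===== PRECONDITION & SPEC =====
def Spec_split_by_value (alt : List String) (runs : List String) (value : String) (out : List (List String) × List (List String)) : Prop := out = split_by_value_alt alt runs value
instance (alt : List String) (runs : List String) (value : String) (out : List (List String) × List (List String)) : Decidable (Spec_split_by_value alt runs value out) := by unfold Spec_split_by_value; infer_instance

-- ===== CLAIM (what is proved, stated in full; the proofs are below) =====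
def Claim_equal_split_by_value : Prop := ∀ (alt : List String) (runs : List String) (value : String), Dom_split_by_value alt runs value → Spec_split_by_value alt runs value (split_by_value alt runs value)

-- ===== LEMMAS AND PROOFS =====

/-- Reference splitter: first group and the list of later groups. -/
def pvParts (value : String) : List (String × String) → List (String × String) × List (List (String × String))
  | [] => ([], [])
  | p :: t =>
    let q := pvParts value t
    if pvSep value p.1 then ([], q.1 :: q.2) else (p :: q.1, q.2)

def pvSeps (value : String) (ps : List (String × String)) : List Int :=
  ((PySem.List.enumerate ps 0).filter (fun q => pvSep value q.2.1)).map (·.1)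

def pvPartsB (value : String) (ps : List (String × String)) : List (List (String × String)) :=
  (((-1 : Int) :: pvSeps value ps).zip (pvSeps value ps ++ [(ps.length : Int)])).map
    (fun b => PySem.List.slice ps (some (b.1 + 1)) (some b.2))

theorem pvEnumShift {α : Type} (t : List α) (s : Int) :
    PySem.List.enumerate t (s + 1) = (PySem.List.enumerate t s).map (fun q => (q.1 + 1, q.2)) := by
  induction t generalizing s with
  | nil => simp [PySem.List.enumerate_nil]
  | cons x xs ih =>
    simp only [PySem.List.enumerate_cons, List.map_cons]
    rw [ih (s + 1)]

theorem pvSeps_nil (value : String) : pvSeps value [] = [] := by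
  simp [pvSeps, PySem.List.enumerate_nil]

theorem pvSeps_cons (value : String) (p : String × String) (t : List (String × String)) :
    pvSeps value (p :: t) =
      (if pvSep value p.1 then [(0 : Int)] else []) ++ (pvSeps value t).map (· + 1) := by
  simp only [pvSeps, PySem.List.enumerate_cons]
  rw [show (0 : Int) + 1 = 0 + 1 by ring, pvEnumShift t 0]
  rw [List.filter_cons, List.filter_map]
  by_cases h : pvSep value p.1 <;> simp [h, Function.comp_def]

theorem pvSeps_cons_sep (value : String) (p : String × String) (t : List (String × String))
    (h : pvSep value p.1 = true) :
    pvSeps value (p :: t) = (0 : Int) :: (pvSeps value t).map (· + 1) := by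
  rw [pvSeps_cons]; simp [h]

theorem pvSeps_cons_nonsep (value : String) (p : String × String) (t : List (String × String))
    (h : pvSep value p.1 = false) :
    pvSeps value (p :: t) = (pvSeps value t).map (· + 1) := by
  rw [pvSeps_cons]; simp [h]

theorem pvSeps_nonneg (value : String) (ps : List (String × String)) :
    ∀ i ∈ pvSeps value ps, 0 ≤ i := by
  induction ps with
  | nil => simp [pvSeps_nil]
  | cons p t ih =>
    intro i hi
    rw [pvSeps_cons] at hi
    rcases List.mem_append.1 hi with h | h
    · split at h <;> simp_all
    · obtain ⟨j, hj, rfl⟩ := List.mem_map.1 h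
      have := ih j hj; omega

theorem pvSlice_zero_succ {α : Type} (p : α) (t : List α) (b : Int) (hb : 0 ≤ b) :
    PySem.List.slice (p :: t) (some ((-1) + 1)) (some (b + 1)) =
      p :: PySem.List.slice t (some ((-1) + 1)) (some b) := by
  rw [show ((-1 : Int) + 1) = 0 by ring]
  rw [PySem.List.slice_zero_start, PySem.List.slice_zero_start,
      PySem.List.slice_to _ hb, PySem.List.slice_to _ (by omega : (0:Int) ≤ b + 1)]
  rw [show (b + 1).toNat = b.toNat + 1 by omega]
  simp

theorem pvSlice_succ_succ {α : Type} (p : α) (t : List α) (a b : Int) (ha : 0 ≤ a) (hb : 0 ≤ b) :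
    PySem.List.slice (p :: t) (some (a + 1)) (some (b + 1)) =
      PySem.List.slice t (some a) (some b) := by
  rw [PySem.List.slice_toNat _ (by omega) (by omega), PySem.List.slice_toNat _ ha hb]
  rw [show (a + 1).toNat = a.toNat + 1 by omega, show (b + 1).toNat = b.toNat + 1 by omega]
  simp [Nat.succ_sub_succ]

theorem pvParts_cons_sep (value : String) (p : String × String) (t : List (String × String))
    (h : pvSep value p.1 = true) :
    pvParts value (p :: t) = ([], (pvParts value t).1 :: (pvParts value t).2) := by
  simp [pvParts, h]

theorem pvParts_cons_nonsep (value : String) (p : String × String) (t : List (String × String))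
    (h : pvSep value p.1 = false) :
    pvParts value (p :: t) = (p :: (pvParts value t).1, (pvParts value t).2) := by
  simp [pvParts, h]

theorem pvPartsB_eq (value : String) (ps : List (String × String)) :
    pvPartsB value ps = (pvParts value ps).1 :: (pvParts value ps).2 := by
  induction ps with
  | nil =>
    simp [pvPartsB, pvSeps_nil, pvParts, PySem.List.slice_zero_start, PySem.List.slice_to _ (le_refl (0:Int))]
  | cons p t ih =>
    have hlen : (((p :: t).length : Nat) : Int) = ((t.length : Nat) : Int) + 1 := by
      simp
    cases hs : pvSep value p.1 with
    | true =>
      -- separator head: a new empty group in front, everything else shifts by one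
      rw [pvParts_cons_sep value p t hs]
      simp only [pvPartsB, pvSeps_cons_sep value p t hs, hlen, List.cons_append]
      have h2 : ((0 : Int) :: (pvSeps value t).map (· + 1)) = ((-1 : Int) :: pvSeps value t).map (· + 1) := by
        simp
      have h3 : ((pvSeps value t).map (· + 1) ++ [((t.length : Nat) : Int) + 1]) =
          (pvSeps value t ++ [((t.length : Nat) : Int)]).map (· + 1) := by
        simp
      rw [List.zip_cons_cons, h2, h3, List.zip_map]
      rw [List.map_cons]
      have hfirst : PySem.List.slice (p :: t) (some ((-1 : Int) + 1)) (some 0) = [] := by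
        rw [show ((-1 : Int) + 1) = 0 by ring, PySem.List.slice_zero_start,
            PySem.List.slice_to _ (le_refl (0:Int))]
        simp
      rw [hfirst, List.map_map]
      have hmap : ∀ b ∈ (((-1 : Int) :: pvSeps value t).zip (pvSeps value t ++ [((t.length : Nat) : Int)])),
          ((fun b => PySem.List.slice (p :: t) (some (b.1 + 1)) (some b.2)) ∘ Prod.map (· + 1) (· + 1)) b
            = PySem.List.slice t (some (b.1 + 1)) (some b.2) := by
        intro b hb
        obtain ⟨h1, h2⟩ := List.of_mem_zip hb
        have hb1 : -1 ≤ b.1 := by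
          rcases List.mem_cons.1 h1 with h | h
          · omega
          · have := pvSeps_nonneg value t _ h; omega
        have hb2 : 0 ≤ b.2 := by
          rcases List.mem_append.1 h2 with h | h
          · exact pvSeps_nonneg value t _ h
          · simp at h; omega
        simp only [Function.comp_def, Prod.map]
        exact pvSlice_succ_succ p t (b.1 + 1) b.2 (by omega) hb2
      rw [List.map_congr_left hmap]
      unfold pvPartsB at ih
      rw [ih]
    | false =>
      -- non-separator head: it is prepended to the first group
      rw [pvParts_cons_nonsep value p t hs]
      simp only [pvPartsB, pvSeps_cons_nonsep value p t hs, hlen]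
      obtain ⟨c, cs, hcc⟩ : ∃ c cs, pvSeps value t ++ [((t.length : Nat) : Int)] = c :: cs := by
        cases pvSeps value t <;> exact ⟨_, _, rfl⟩
      have hc : 0 ≤ c := by
        have : c ∈ pvSeps value t ++ [((t.length : Nat) : Int)] := by rw [hcc]; exact List.mem_cons_self ..
        rcases List.mem_append.1 this with h | h
        · exact pvSeps_nonneg value t _ h
        · simp at h; omega
      have h3 : ((pvSeps value t).map (· + 1) ++ [((t.length : Nat) : Int) + 1]) =
          (c + 1) :: cs.map (· + 1) := by
        have : ((pvSeps value t).map (· + 1) ++ [((t.length : Nat) : Int) + 1]) =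
            (pvSeps value t ++ [((t.length : Nat) : Int)]).map (· + 1) := by
          simp
        rw [this, hcc]; simp
      rw [h3, List.zip_cons_cons, List.map_cons]
      -- IH, rewritten through hcc
      rw [pvPartsB, hcc, List.zip_cons_cons, List.map_cons] at ih
      -- first group of ps
      have hfirst : PySem.List.slice (p :: t) (some ((-1 : Int) + 1)) (some (c + 1)) =
          p :: PySem.List.slice t (some ((-1 : Int) + 1)) (some c) :=
        pvSlice_zero_succ p t c hc
      rw [hfirst]
      -- remaining groups of ps
      have hmap : ∀ b ∈ ((pvSeps value t).zip cs),
          ((fun b => PySem.List.slice (p :: t) (some (b.1 + 1)) (some b.2)) ∘ Prod.map (· + 1) (· + 1)) b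
            = PySem.List.slice t (some (b.1 + 1)) (some b.2) := by
        intro b hb
        obtain ⟨h1, h2⟩ := List.of_mem_zip hb
        have hb1 : 0 ≤ b.1 := pvSeps_nonneg value t _ h1
        have hb2 : 0 ≤ b.2 := by
          have : b.2 ∈ pvSeps value t ++ [((t.length : Nat) : Int)] := by
            rw [hcc]; exact List.mem_cons_of_mem _ h2
          rcases List.mem_append.1 this with h | h
          · exact pvSeps_nonneg value t _ h
          · simp at h; omega
        simp only [Function.comp_def, Prod.map]
        exact pvSlice_succ_succ p t (b.1 + 1) b.2 (by omega) hb2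
      rw [List.zip_map, List.map_map, List.map_congr_left hmap]
      have := ih
      injection this with ihg ihgs
      rw [ihg, ihgs]

theorem pvStepA_sep (value : String)
    (st : List (List String) × List (List String) × List String × List String)
    (p : String × String) (h : pvSep value p.1 = true) :
    pvStepA value st p = (st.1 ++ [st.2.2.1], st.2.1 ++ [st.2.2.2], [], []) := by
  simp [pvStepA, h]

theorem pvStepA_nonsep (value : String)
    (st : List (List String) × List (List String) × List String × List String)
    (p : String × String) (h : pvSep value p.1 = false) :
    pvStepA value st p = (st.1, st.2.1, st.2.2.1 ++ [p.1], st.2.2.2 ++ [p.2]) := by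
  simp [pvStepA, h]

theorem pvFoldA (value : String) (ps : List (String × String)) :
    ∀ (ar rr : List (List String)) (ta tr : List String),
      (let fin := ps.foldl (pvStepA value) (ar, rr, ta, tr)
       (fin.1 ++ [fin.2.2.1], fin.2.1 ++ [fin.2.2.2]))
      = (ar ++ (ta ++ (pvParts value ps).1.map (·.1)) :: (pvParts value ps).2.map (List.map (·.1)),
         rr ++ (tr ++ (pvParts value ps).1.map (·.2)) :: (pvParts value ps).2.map (List.map (·.2))) := by
  induction ps with
  | nil => intro ar rr ta tr; simp [pvParts]
  | cons p t ih =>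
    intro ar rr ta tr
    cases hs : pvSep value p.1 with
    | true =>
      rw [pvParts_cons_sep value p t hs]
      simp only [List.foldl_cons, pvStepA_sep value _ p hs]
      rw [ih (ar ++ [ta]) (rr ++ [tr]) [] []]
      simp
    | false =>
      rw [pvParts_cons_nonsep value p t hs]
      simp only [List.foldl_cons, pvStepA_nonsep value _ p hs]
      rw [ih ar rr (ta ++ [p.1]) (tr ++ [p.2])]
      simp

-- ===== VERDICT (by name: the statement is the Claim_ definition above) =====
theorem split_by_value_spec : Claim_equal_split_by_value := by
  intro alt runs value _
  simp only [Spec_split_by_value, split_by_value, split_by_value_alt]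
  have hA := pvFoldA value (alt.zip runs) [] [] [] []
  simp only [List.nil_append] at hA
  rw [hA]
  have hB := pvPartsB_eq value (alt.zip runs)
  unfold pvPartsB pvSeps at hB
  rw [hB]
  simp
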